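-- pv_equiv track=rewrite | github.com/aokassamali/coding-agent-evals | src/coding_eval/ablation_readout.py | _oscillation
-- ===== SOURCE A (Python) =====
-- from typing import Any, Dict, Iterable, List, Optional, Tuple
--
-- def _oscillation(xs: List[Optional[int]]) -> bool:
--     """
--     Thrash/oscillation on failure counts: there exists a decrease at some point,
--     and later an increase.
--       [2, 1, 2] => True
--       [3, 2, 1] => False
--       [2, 2, 2] => False
--     """
--     ys = [x for x in xs if isinstance(x, int)]
--     if len(ys) < 3:
--         return False
--     saw_decrease = False
--     for i in range(1, len(ys)):
--         if ys[i] < ys[i - 1]: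
--             saw_decrease = True
--         elif saw_decrease and ys[i] > ys[i - 1]:
--             return True
--     return False
-- ===== SOURCE B (Python) =====
-- def _oscillation(xs):
--     ys = [x for x in xs if isinstance(x, int)]
--     if not ys:
--         return False
--     m = ys.index(max(ys))
--     pre, suf = ys[:m + 1], ys[m:]
--     return not (pre == sorted(pre) and suf == sorted(suf, reverse=True))
-- ===== Notes on version B (the rewrite author's own statement) =====
-- stated objective: alternative
-- what changed: Replaces A's saw_decrease state-machine scan by a max-based unimodality test: split ys at the first occurrence of its maximum and report oscillation unless the prefix equals its ascending sort and the suffix equals its descending sort.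
import Mathlib
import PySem

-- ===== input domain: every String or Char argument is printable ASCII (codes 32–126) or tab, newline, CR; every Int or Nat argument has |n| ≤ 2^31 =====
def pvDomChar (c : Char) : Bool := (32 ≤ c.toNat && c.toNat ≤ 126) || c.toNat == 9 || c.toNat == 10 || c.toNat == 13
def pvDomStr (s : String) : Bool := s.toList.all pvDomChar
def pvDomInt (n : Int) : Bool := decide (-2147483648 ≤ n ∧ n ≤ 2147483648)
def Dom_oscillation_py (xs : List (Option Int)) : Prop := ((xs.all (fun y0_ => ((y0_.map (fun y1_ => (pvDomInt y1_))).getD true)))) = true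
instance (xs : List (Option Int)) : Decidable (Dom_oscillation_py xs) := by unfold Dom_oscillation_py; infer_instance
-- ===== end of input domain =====

-- B replaces A's saw_decrease state machine by a max-based unimodality test:
-- split ys at the first occurrence of its maximum and compare the two parts with
-- their library-sorted versions (ascending / descending); 'alternative' objective.

-- ===== PORT A =====
-- the 'for i in range(1, len(ys))' loop with early return, state saw_decrease
def oscillation_loopA (ys : List Int) (i : Nat) (saw : Bool) : Bool :=
  if _h : i < ys.length then
    if ys.getD i 0 < ys.getD (i - 1) 0 then oscillation_loopA ys (i + 1) true
    else if saw && decide (ys.getD i 0 > ys.getD (i - 1) 0) then true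
    else oscillation_loopA ys (i + 1) saw
  else false
termination_by ys.length - i

def oscillation_py (xs : List (Option Int)) : Bool :=
  let ys := xs.filterMap id           -- [x for x in xs if isinstance(x, int)]
  if ys.length < 3 then false
  else oscillation_loopA ys 1 false

-- ===== PORT B =====
def oscillation_py_alt (xs : List (Option Int)) : Bool :=
  let ys := xs.filterMap id           -- same filter as A
  if ys.isEmpty then false            -- if not ys: return False
  else
    let mx := (PySem.List.max? ys (fun y => y)).getD 0  -- max(ys); ys is nonempty here
    let m := (PySem.List.index? ys mx).getD 0   -- m = ys.index(max(ys)); always found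
      let pre := PySem.List.slice ys none (some ((m + 1 : Nat) : Int))  -- ys[:m+1]
      let suf := PySem.List.slice ys (some ((m : Nat) : Int)) none      -- ys[m:]
      !((pre == PySem.List.sorted pre (fun y => y)) &&
        (suf == PySem.List.sorted suf (fun y => y) true))

-- ===== PRECONDITION & SPEC =====
def Spec_oscillation_py (xs : List (Option Int)) (out : Bool) : Prop := out = oscillation_py_alt xs
instance (xs : List (Option Int)) (out : Bool) : Decidable (Spec_oscillation_py xs out) := by unfold Spec_oscillation_py; infer_instance

-- ===== CLAIM (what is proved, stated in full; the proofs are below) =====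
def Claim_equal_oscillation_py : Prop := ∀ (xs : List (Option Int)), Dom_oscillation_py xs → Spec_oscillation_py xs (oscillation_py xs)

-- ===== LEMMAS AND PROOFS =====

-- "a decrease, and later an increase" as a proposition over adjacent pairs
def oscE (ys : List Int) : Prop :=
  ∃ j k : Nat, 1 ≤ j ∧ j < k ∧ k < ys.length ∧
    ys.getD j 0 < ys.getD (j - 1) 0 ∧ ys.getD (k - 1) 0 < ys.getD k 0

-- A's loop after the first decrease: scans for any adjacent increase
theorem loopA_true_iff (ys : List Int) (i : Nat) :
    oscillation_loopA ys i true = true ↔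
      ∃ k, i ≤ k ∧ k < ys.length ∧ ys.getD (k - 1) 0 < ys.getD k 0 := by
  by_cases h : i < ys.length
  · rw [oscillation_loopA, dif_pos h]
    by_cases hd : ys.getD i 0 < ys.getD (i - 1) 0
    · rw [if_pos hd, loopA_true_iff ys (i + 1)]
      constructor
      · rintro ⟨k, h1, h2, h3⟩; exact ⟨k, by omega, h2, h3⟩
      · rintro ⟨k, h1, h2, h3⟩
        refine ⟨k, ?_, h2, h3⟩
        rcases Nat.eq_or_lt_of_le h1 with he | hl
        · subst he; omega
        · omega
    · rw [if_neg hd]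
      by_cases hinc : ys.getD i 0 > ys.getD (i - 1) 0
      · rw [if_pos (show (true && decide (ys.getD i 0 > ys.getD (i - 1) 0)) = true by
          rw [Bool.true_and, decide_eq_true hinc])]
        constructor
        · intro _; exact ⟨i, le_refl _, h, hinc⟩
        · intro _; rfl
      · rw [if_neg (show ¬ ((true && decide (ys.getD i 0 > ys.getD (i - 1) 0)) = true) by
          rw [Bool.true_and, decide_eq_false hinc]; exact Bool.false_ne_true),
          loopA_true_iff ys (i + 1)]
        constructor
        · rintro ⟨k, h1, h2, h3⟩; exact ⟨k, by omega, h2, h3⟩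
        · rintro ⟨k, h1, h2, h3⟩
          refine ⟨k, ?_, h2, h3⟩
          rcases Nat.eq_or_lt_of_le h1 with he | hl
          · subst he; exact absurd h3 hinc
          · omega
  · rw [oscillation_loopA, dif_neg h]
    simp only [Bool.false_eq_true, false_iff]
    rintro ⟨k, h1, h2, _⟩; omega
termination_by ys.length - i

-- A's loop before any decrease: finds a decrease, then an increase after it
theorem loopA_false_iff (ys : List Int) (i : Nat) (hi : 1 ≤ i) :
    oscillation_loopA ys i false = true ↔
      ∃ j k, i ≤ j ∧ j < k ∧ k < ys.length ∧
        ys.getD j 0 < ys.getD (j - 1) 0 ∧ ys.getD (k - 1) 0 < ys.getD k 0 := by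
  by_cases h : i < ys.length
  · rw [oscillation_loopA, dif_pos h]
    by_cases hd : ys.getD i 0 < ys.getD (i - 1) 0
    · rw [if_pos hd, loopA_true_iff ys (i + 1)]
      constructor
      · rintro ⟨k, h1, h2, h3⟩; exact ⟨i, k, le_refl _, by omega, h2, hd, h3⟩
      · rintro ⟨j, k, h1, h2, h3, h4, h5⟩; exact ⟨k, by omega, h3, h5⟩
    · rw [if_neg hd, if_neg (by simp), loopA_false_iff ys (i + 1) (by omega)]
      constructor
      · rintro ⟨j, k, h1, h2, h3, h4, h5⟩; exact ⟨j, k, by omega, h2, h3, h4, h5⟩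
      · rintro ⟨j, k, h1, h2, h3, h4, h5⟩
        refine ⟨j, k, ?_, h2, h3, h4, h5⟩
        rcases Nat.eq_or_lt_of_le h1 with he | hl
        · subst he; exact absurd h4 hd
        · omega
  · rw [oscillation_loopA, dif_neg h]
    simp only [Bool.false_eq_true, false_iff]
    rintro ⟨j, k, h1, h2, h3, _, _⟩; omega
termination_by ys.length - i

theorem A_iff (xs : List (Option Int)) :
    oscillation_py xs = true ↔ oscE (xs.filterMap id) := by
  unfold oscillation_py
  set ys := xs.filterMap id with hys
  simp only
  by_cases h3 : ys.length < 3
  · rw [if_pos h3]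
    simp only [Bool.false_eq_true, false_iff]
    rintro ⟨j, k, h1, h2, h3', _, _⟩; omega
  · rw [if_neg h3, loopA_false_iff ys 1 (le_refl 1)]
    exact Iff.rfl

-- a list equals its ascending sort iff it is weakly increasing (and the reverse twin)
theorem eq_sorted_iff_pairwise (l : List Int) :
    (l == PySem.List.sorted l (fun y => y)) = true ↔ l.Pairwise (· ≤ ·) := by
  rw [beq_iff_eq]
  constructor
  · intro h
    have hp := PySem.List.sorted_pairwise l (fun y => y)
    rw [← h] at hp
    exact hp
  · intro h
    exact (PySem.List.sorted_eq_self_of_pairwise l (fun y => y) h).symm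

theorem eq_sorted_rev_iff_pairwise (l : List Int) :
    (l == PySem.List.sorted l (fun y => y) true) = true ↔ l.Pairwise (fun a b => b ≤ a) := by
  rw [beq_iff_eq]
  constructor
  · intro h
    have hp := PySem.List.sorted_pairwise_rev l (fun y => y)
    rw [← h] at hp
    exact hp
  · intro h
    exact (PySem.List.sorted_rev_eq_self_of_pairwise l (fun y => y) h).symm

-- no strict increase step on (a, b] forces a weak decrease overall (and the twin)
theorem no_inc_le (ys : List Int) (a b : Nat) (hab : a ≤ b)
    (h : ∀ k, a < k → k ≤ b → ¬ ys.getD (k - 1) 0 < ys.getD k 0) :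
    ys.getD b 0 ≤ ys.getD a 0 := by
  induction b with
  | zero => have : a = 0 := by omega
            subst this; exact le_refl _
  | succ b ih =>
    rcases Nat.eq_or_lt_of_le hab with he | hl
    · rw [he]
    · have h1 : ¬ ys.getD (b + 1 - 1) 0 < ys.getD (b + 1) 0 := h (b + 1) (by omega) (le_refl _)
      have h2 := ih (by omega) (fun k hk1 hk2 => h k hk1 (by omega))
      simp only [Nat.add_sub_cancel] at h1
      omega

theorem no_dec_ge (ys : List Int) (a b : Nat) (hab : a ≤ b)
    (h : ∀ k, a < k → k ≤ b → ¬ ys.getD k 0 < ys.getD (k - 1) 0) :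
    ys.getD a 0 ≤ ys.getD b 0 := by
  induction b with
  | zero => have : a = 0 := by omega
            subst this; exact le_refl _
  | succ b ih =>
    rcases Nat.eq_or_lt_of_le hab with he | hl
    · rw [he]
    · have h1 : ¬ ys.getD (b + 1) 0 < ys.getD (b + 1 - 1) 0 := h (b + 1) (by omega) (le_refl _)
      have h2 := ih (by omega) (fun k hk1 hk2 => h k hk1 (by omega))
      simp only [Nat.add_sub_cancel] at h1
      omega

-- no oscillation ⟹ weakly increasing up to the first max, weakly decreasing from it
theorem unimodal_of_not_osc (ys : List Int) (mx : Int) (m : Nat)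
    (hmax : ∀ y ∈ ys, y ≤ mx)
    (hm : m < ys.length) (hym : ys.getD m 0 = mx)
    (hfirst : ∀ j, j < m → ys.getD j 0 ≠ mx)
    (hE : ¬ oscE ys) :
    (ys.take (m + 1)).Pairwise (· ≤ ·) ∧ (ys.drop m).Pairwise (fun a b => b ≤ a) := by
  have g : ∀ (p : Nat), p < ys.length → ys.getD p 0 ∈ ys := by
    intro p hp
    rw [List.getD_eq_getElem ys 0 hp]
    exact List.getElem_mem hp
  -- adjacent ascent up to m
  have hAsc : ∀ i, i + 1 ≤ m → ys.getD i 0 ≤ ys.getD (i + 1) 0 := by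
    intro i him
    by_contra hlt
    have hdecj : ys.getD (i + 1) 0 < ys.getD (i + 1 - 1) 0 := by
      simp only [Nat.add_sub_cancel]; omega
    have hnoinc : ∀ k', i + 1 < k' → k' < ys.length → ¬ ys.getD (k' - 1) 0 < ys.getD k' 0 :=
      fun k' h1 h2 hk' => hE ⟨i + 1, k', by omega, h1, h2, hdecj, hk'⟩
    rcases Nat.eq_or_lt_of_le him with he | hl
    · -- i+1 = m: ys[m] < ys[m-1] ≤ mx = ys[m], absurd
      have hle := hmax _ (g (i + 1 - 1) (by omega))
      rw [← he] at hym
      omega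
    · -- i+1 < m: ys[i+1] < mx yet no increase up to m forces ys[m] ≤ ys[i+1]
      have hne := hfirst (i + 1) hl
      have hle := hmax _ (g (i + 1) (by omega))
      have hmono := no_inc_le ys (i + 1) m (by omega)
        (fun k hk1 hk2 => hnoinc k hk1 (by omega))
      omega
  -- adjacent descent from m on
  have hDesc : ∀ i, m ≤ i → i + 1 < ys.length → ys.getD (i + 1) 0 ≤ ys.getD i 0 := by
    intro i hmi hin
    by_contra hlt
    have hinck : ys.getD (i + 1 - 1) 0 < ys.getD (i + 1) 0 := by
      simp only [Nat.add_sub_cancel]; omega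
    have hnodec : ∀ j, 1 ≤ j → j < i + 1 → ¬ ys.getD j 0 < ys.getD (j - 1) 0 :=
      fun j h1 h2 hj => hE ⟨j, i + 1, h1, h2, hin, hj, hinck⟩
    have hmono := no_dec_ge ys m i hmi (fun k hk1 hk2 => hnodec k (by omega) (by omega))
    have hle := hmax _ (g (i + 1) hin)
    omega
  constructor
  · rw [List.pairwise_iff_getElem]
    intro a b ha hb hab
    have hlen : (ys.take (m + 1)).length = m + 1 := by
      rw [List.length_take]; omega
    rw [hlen] at ha hb
    rw [List.getElem_take, List.getElem_take]
    have hmono := no_dec_ge ys a b (by omega) (fun k hk1 hk2 => by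
      have h1 := hAsc (k - 1) (by omega)
      have hk : k - 1 + 1 = k := by omega
      rw [hk] at h1
      omega)
    rwa [List.getD_eq_getElem ys 0 (by omega), List.getD_eq_getElem ys 0 (by omega)] at hmono
  · rw [List.pairwise_iff_getElem]
    intro a b ha hb hab
    have hlen : (ys.drop m).length = ys.length - m := List.length_drop
    rw [hlen] at ha hb
    rw [List.getElem_drop, List.getElem_drop]
    have hmono := no_inc_le ys (m + a) (m + b) (by omega) (fun k hk1 hk2 => by
      have h1 := hDesc (k - 1) (by omega) (by omega)
      have hk : k - 1 + 1 = k := by omega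
      rw [hk] at h1
      omega)
    rwa [List.getD_eq_getElem ys 0 (by omega), List.getD_eq_getElem ys 0 (by omega)] at hmono

-- the heart: oscillation ⟺ not (weakly increasing to the first max, weakly decreasing after)
theorem osc_iff_not_unimodal (ys : List Int) (mx : Int) (m : Nat)
    (hmax : ∀ y ∈ ys, y ≤ mx)
    (hm : m < ys.length) (hym : ys.getD m 0 = mx)
    (hfirst : ∀ j, j < m → ys.getD j 0 ≠ mx) :
    oscE ys ↔
      ¬((ys.take (m + 1)).Pairwise (· ≤ ·) ∧ (ys.drop m).Pairwise (fun a b => b ≤ a)) := by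
  constructor
  · rintro ⟨j, k, hj1, hjk, hk, hdec, hinc⟩ ⟨hA, hD⟩
    by_cases hjm : j ≤ m
    · -- the decrease lies in the ascending part
      have hlen : (ys.take (m + 1)).length = m + 1 := by
        rw [List.length_take]; omega
      have h1 := List.pairwise_iff_getElem.mp hA (j - 1) j
        (by rw [hlen]; omega) (by rw [hlen]; omega) (by omega)
      rw [List.getElem_take, List.getElem_take] at h1
      have h1' : ys.getD (j - 1) 0 ≤ ys.getD j 0 := by
        rw [List.getD_eq_getElem ys 0 (by omega), List.getD_eq_getElem ys 0 (by omega)]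
        exact h1
      omega
    · -- the increase lies in the descending part
      have hlen : (ys.drop m).length = ys.length - m := List.length_drop
      have h1 := List.pairwise_iff_getElem.mp hD (k - 1 - m) (k - m)
        (by rw [hlen]; omega) (by rw [hlen]; omega) (by omega)
      rw [List.getElem_drop, List.getElem_drop] at h1
      have h1' : ys.getD (m + (k - m)) 0 ≤ ys.getD (m + (k - 1 - m)) 0 := by
        rw [List.getD_eq_getElem ys 0 (by omega), List.getD_eq_getElem ys 0 (by omega)]
        exact h1
      have e1 : m + (k - 1 - m) = k - 1 := by omega
      have e2 : m + (k - m) = k := by omega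
      rw [e1, e2] at h1'
      omega
  · intro hnot
    by_contra hE
    exact hnot (unimodal_of_not_osc ys mx m hmax hm hym hfirst hE)

-- ===== VERDICT (by name: the statement is the Claim_ definition above) =====
theorem oscillation_py_spec : Claim_equal_oscillation_py := by
  intro xs _
  unfold Spec_oscillation_py
  rw [Bool.eq_iff_iff, A_iff]
  unfold oscillation_py_alt
  set ys := xs.filterMap id with hys
  simp only
  by_cases hnil : ys.isEmpty
  · rw [if_pos hnil]
    have hn : ys = [] := List.isEmpty_iff.mp hnil
    simp only [Bool.false_eq_true, iff_false]
    rintro ⟨j, k, h1, h2, h3, _, _⟩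
    rw [hn] at h3; simp at h3
  · rw [if_neg hnil]
    have hne : ys ≠ [] := by simpa [List.isEmpty_iff] using hnil
    obtain ⟨mx, hmx⟩ : ∃ mx, PySem.List.max? ys (fun y => y) = some mx := by
      cases h : PySem.List.max? ys (fun y => y) with
      | none => exact absurd ((PySem.List.max?_eq_none_iff ys _).mp h) hne
      | some mx => exact ⟨mx, rfl⟩
    rw [hmx]
    simp only [Option.getD_some]
    have hmem : mx ∈ ys := PySem.List.max?_mem hmx
    obtain ⟨m, hm⟩ : ∃ m, PySem.List.index? ys mx = some m := by
      have := (PySem.List.index?_isSome_iff ys mx).mpr hmem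
      exact Option.isSome_iff_exists.mp this
    rw [hm]
    simp only [Option.getD_some]
    rw [PySem.List.slice_to_natCast, PySem.List.slice_from_natCast]
    have hbool : ∀ a b : Bool, ((!(a && b)) = true) ↔ ¬(a = true ∧ b = true) := by decide
    rw [hbool, eq_sorted_iff_pairwise, eq_sorted_rev_iff_pairwise]
    obtain ⟨hmlt, hymx, hfirst⟩ := PySem.List.getElem_of_index?_eq_some hm
    refine osc_iff_not_unimodal ys mx m ?_ hmlt ?_ ?_
    · exact fun y hy => PySem.List.max?_isMax hmx y hy
    · rw [List.getD_eq_getElem ys 0 hmlt]; exact hymx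
    · intro j hj; rw [List.getD_eq_getElem ys 0 (by omega)]; exact hfirst j hj
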